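-- pv_equiv track=rewrite | github.com/Theerat22/TSL_WEB | app.py | overlap_merge
-- ===== SOURCE A (Python) =====
-- def overlap_merge(lists):
--     merged = lists[0][:]  # Start with the first list (make a copy)
--
--     for lst in lists[1:]:
--         # Find the maximum overlap between merged and lst
--         max_overlap = 0
--         for i in range(len(lst)):
--             if merged[-(i + 1):] == lst[: i + 1]:  # Compare suffix of merged with prefix of lst
--                 max_overlap = i + 1  # Store the maximum matched overlap length
--
--         # Append only the non-overlapping part of lst
--         merged.extend(lst[max_overlap:])
--
--     return merged
-- ===== SOURCE B (Python) =====
-- def overlap_merge(lists):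
--     merged = list(lists[0])
--     for nxt in lists[1:]:
--         # longest candidate: the last min(len(merged), len(nxt)) elements;
--         # peel from the front until the remaining suffix is a prefix of nxt
--         suffix = merged[len(merged) - min(len(merged), len(nxt)):]
--         while suffix != nxt[:len(suffix)]:
--             suffix = suffix[1:]
--         merged = merged + nxt[len(suffix):]
--     return merged
-- ===== Notes on version B (the rewrite author's own statement) =====
-- stated objective: alternative
-- what changed: A's ascending scan over every overlap length with a running max is replaced by a descending peel: start from the longest candidate suffix and drop its head until it is a prefix of the next list, returning at the first (hence maximal) match.
-- outside the precondition, e.g. on overlap_merge([]): A raises IndexError, B raises IndexError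
import Mathlib
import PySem

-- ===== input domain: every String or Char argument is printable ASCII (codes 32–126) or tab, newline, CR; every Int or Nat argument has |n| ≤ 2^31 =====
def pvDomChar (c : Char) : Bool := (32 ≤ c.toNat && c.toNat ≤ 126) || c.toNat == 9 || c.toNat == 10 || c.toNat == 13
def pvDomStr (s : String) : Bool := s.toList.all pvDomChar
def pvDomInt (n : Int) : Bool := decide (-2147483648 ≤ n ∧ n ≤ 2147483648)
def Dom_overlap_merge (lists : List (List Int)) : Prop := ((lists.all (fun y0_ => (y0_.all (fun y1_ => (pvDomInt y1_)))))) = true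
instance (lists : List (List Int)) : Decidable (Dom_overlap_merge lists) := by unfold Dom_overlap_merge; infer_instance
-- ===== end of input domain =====

-- B replaces A's ascending max-overlap scan by a descending peel with early exit (objective: alternative, same worst-case cost).

-- ===== PORT A =====
def overlap_merge (lists : List (List Int)) : List Int :=
  -- merged = lists[0][:]
  let merged := (PySem.List.pyGet? lists 0).getD []
  -- for lst in lists[1:]:
  (PySem.List.slice lists (some 1) none).foldl
    (fun merged lst =>
      -- max_overlap = 0; for i in range(len(lst)): if merged[-(i+1):] == lst[:i+1]: max_overlap = i+1
      let maxOv : Int := (PySem.List.pyRange 0 lst.length 1).foldl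
        (fun mo i =>
          if PySem.List.slice merged (some (-(i + 1))) none
             = PySem.List.slice lst none (some (i + 1))
          then i + 1 else mo) 0
      -- merged.extend(lst[max_overlap:])
      merged ++ PySem.List.slice lst (some maxOv) none)
    merged

-- ===== PORT B =====
-- while suffix != nxt[:len(suffix)]: suffix = suffix[1:]
def pvPeel (suffix nxt : List Int) : List Int :=
  if suffix = nxt.take suffix.length then suffix
  else pvPeel suffix.tail nxt
termination_by suffix.length
decreasing_by
  cases suffix with
  | nil => simp_all
  | cons a t => simp

def overlap_merge_alt (lists : List (List Int)) : List Int :=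
  match lists with
  | [] => []  -- lists[0] raises IndexError in B too; excluded by Pre_
  | first :: rest =>
    rest.foldl
      (fun merged nxt =>
        let suffix := pvPeel (merged.drop (merged.length - min merged.length nxt.length)) nxt
        merged ++ nxt.drop suffix.length)
      first

-- ===== PRECONDITION & SPEC =====
-- A evaluates lists[0] and raises IndexError on the empty list of lists (B raises there too).
def Pre_overlap_merge (lists : List (List Int)) : Prop := lists ≠ []
instance (lists : List (List Int)) : Decidable (Pre_overlap_merge lists) := by unfold Pre_overlap_merge; infer_instance

def pvWitness_overlap_merge : List (List Int) := [[1, 2, 3], [2, 3, 4], [5]]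

def Spec_overlap_merge (lists : List (List Int)) (out : List Int) : Prop := out = overlap_merge_alt lists
instance (lists : List (List Int)) (out : List Int) : Decidable (Spec_overlap_merge lists out) := by unfold Spec_overlap_merge; infer_instance

-- ===== CLAIM (what is proved, stated in full; the proofs are below) =====
def Claim_equal_overlap_merge : Prop := ∀ (lists : List (List Int)), Dom_overlap_merge lists → Pre_overlap_merge lists → Spec_overlap_merge lists (overlap_merge lists)

-- ===== LEMMAS AND PROOFS =====

-- k is a valid overlap: the length-k suffix of `merged` equals the length-k prefix of `lst`
def GoodK (merged lst : List Int) (k : Nat) : Prop :=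
  k ≤ lst.length ∧ k ≤ merged.length ∧ merged.drop (merged.length - k) = lst.take k

theorem goodK_zero (merged lst : List Int) : GoodK merged lst 0 := by
  refine ⟨Nat.zero_le _, Nat.zero_le _, ?_⟩
  simp

-- A's inner condition at index j equals GoodK (j+1) (for j < lst.length)
theorem condA_iff (merged lst : List Int) (j : Nat) (hj : j < lst.length) :
    (merged.drop (merged.length - (j + 1)) = lst.take (j + 1)) ↔ GoodK merged lst (j + 1) := by
  constructor
  · intro h
    by_cases hm : j + 1 ≤ merged.length
    · exact ⟨hj, hm, h⟩
    · exfalso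
      have h1 : (merged.drop (merged.length - (j + 1))).length = merged.length := by
        have : merged.length - (j + 1) = 0 := by omega
        simp [this]
      have h2 : (lst.take (j + 1)).length = j + 1 := by
        simp; omega
      rw [h] at h1; omega
  · rintro ⟨_, _, h⟩; exact h

-- A's inner fold, restated over List.range with the slices rewritten as drop/take
theorem innerA_aux (merged lst : List Int) : ∀ n, n <= lst.length →
    ∃ K : Nat, K <= n ∧
      ((List.range n).foldl
        (fun mo (j : Nat) =>
          if merged.drop (merged.length - (j + 1)) = lst.take (j + 1) then ((j : Int) + 1) else mo)
        0 = (K : Int))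
      ∧ GoodK merged lst K ∧ ∀ j, j < n → GoodK merged lst (j + 1) → j + 1 <= K := by
  intro n
  induction n with
  | zero => intro _; exact ⟨0, le_refl _, by simp, goodK_zero merged lst, by omega⟩
  | succ n ih =>
    intro hn
    obtain ⟨K, hKn, hfold, hKgood, hKmax⟩ := ih (by omega)
    rw [List.range_succ, List.foldl_append]
    simp only [List.foldl_cons, List.foldl_nil, hfold]
    by_cases hc : merged.drop (merged.length - (n + 1)) = lst.take (n + 1)
    · refine ⟨n + 1, le_refl _, by simp [hc], ?_, ?_⟩
      · exact (condA_iff merged lst n (by omega)).mp hc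
      · intro j hj _; omega
    · refine ⟨K, by omega, by simp [hc], hKgood, ?_⟩
      intro j hj hg
      rcases Nat.lt_succ_iff_lt_or_eq.mp hj with h | h
      · exact hKmax j h hg
      · subst h
        exact absurd ((condA_iff merged lst j (by omega)).mpr hg) hc

-- A's inner fold computes (as an Int) the greatest k with GoodK
theorem innerA_spec (merged lst : List Int) :
    ∃ K : Nat,
      ((PySem.List.pyRange 0 (lst.length : Int) 1).foldl
        (fun mo i =>
          if PySem.List.slice merged (some (-(i + 1))) none
             = PySem.List.slice lst none (some (i + 1))
          then i + 1 else mo) 0) = (K : Int)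
      ∧ GoodK merged lst K ∧ ∀ k, GoodK merged lst k → k <= K := by
  obtain ⟨K, _, hfold, hg, hmax⟩ := innerA_aux merged lst lst.length (le_refl _)
  refine ⟨K, ?_, hg, ?_⟩
  · rw [PySem.List.pyRange_one, List.foldl_map]
    have hln : ((lst.length : Int) - 0).toNat = lst.length := by omega
    rw [hln]
    rw [PySem.List.foldl_congr_mem (List.range lst.length) _
        (fun (mo : Int) (j : Nat) =>
          if merged.drop (merged.length - (j + 1)) = lst.take (j + 1) then ((j : Int) + 1) else mo)
        0 ?_]
    · exact hfold
    · intro mo j _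
      simp only [zero_add]
      have h1 : -((j : Int) + 1) = -(((j + 1 : Nat) : Int)) := by push_cast; ring
      have h2 : ((j : Int) + 1) = (((j + 1 : Nat) : Int)) := by push_cast; ring
      rw [h1, h2, PySem.List.slice_from_neg_natCast merged (j + 1) (by omega),
          PySem.List.slice_to_natCast]
  · intro k hk
    rcases k with _ | k
    · omega
    · exact hmax k (Nat.lt_of_succ_le hk.1) hk

-- pvPeel returns the longest suffix of `suffix` that is a prefix of nxt
theorem peel_spec (suffix nxt : List Int) :
    ∃ K : Nat, K <= suffix.length
      ∧ pvPeel suffix nxt = suffix.drop (suffix.length - K)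
      ∧ suffix.drop (suffix.length - K) = nxt.take K
      ∧ ∀ k, K < k → k <= suffix.length → suffix.drop (suffix.length - k) ≠ nxt.take k := by
  fun_induction pvPeel suffix nxt with
  | case1 s h =>
    exact ⟨s.length, le_refl _, by simp, by simpa using h, by omega⟩
  | case2 s h ih =>
    have hne : s ≠ [] := by
      intro hnil; apply h; subst hnil; simp
    obtain ⟨a, t, rfl⟩ := List.exists_cons_of_ne_nil hne
    obtain ⟨K, hKt, hpeel, hmatch, hmax⟩ := ih
    simp only [List.tail_cons] at hpeel hmatch hmax hKt
    have hdropeq : ∀ k, k <= t.length →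
        (a :: t).drop ((a :: t).length - k) = t.drop (t.length - k) := by
      intro k hk
      have hone : (a :: t).length - k = (t.length - k) + 1 := by simp; omega
      rw [hone, List.drop_succ_cons]
    refine ⟨K, by simp; omega, ?_, ?_, ?_⟩
    · rw [hdropeq K hKt]
      simpa [List.tail_cons] using hpeel
    · rw [hdropeq K hKt]; exact hmatch
    · intro k hKk hkle
      by_cases hk : k <= t.length
      · rw [hdropeq k hk]; exact hmax k hKk hk
      · have hke : k = (a :: t).length := by simp at hkle ⊢; omega
        subst hke
        simpa using h

-- the two step functions agree
theorem step_eq (merged lst : List Int) :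
    (merged ++ PySem.List.slice lst
        (some ((PySem.List.pyRange 0 (lst.length : Int) 1).foldl
          (fun mo i =>
            if PySem.List.slice merged (some (-(i + 1))) none
               = PySem.List.slice lst none (some (i + 1))
            then i + 1 else mo) 0)) none)
    = merged ++ lst.drop (pvPeel (merged.drop (merged.length - min merged.length lst.length)) lst).length := by
  obtain ⟨KA, hfold, hAgood, hAmax⟩ := innerA_spec merged lst
  set m := min merged.length lst.length with hm
  set s0 := merged.drop (merged.length - m) with hs0
  have hs0len : s0.length = m := by
    rw [hs0, List.length_drop]; omega
  obtain ⟨KB, hKB, hpeel, hmatch, hBmax⟩ := peel_spec s0 lst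
  have hbridge : ∀ k, k <= m → s0.drop (s0.length - k) = merged.drop (merged.length - k) := by
    intro k hk
    rw [hs0len, hs0, List.drop_drop]
    congr 1
    omega
  have hKAm : KA <= m := by
    obtain ⟨h1, h2, _⟩ := hAgood; omega
  have hAB : KA <= KB :=
    Nat.le_of_not_lt (fun hlt =>
      hBmax KA hlt (by omega) (by rw [hbridge KA hKAm]; exact hAgood.2.2))
  have hBA : KB <= KA := by
    apply hAmax
    refine ⟨by omega, by omega, ?_⟩
    rw [← hbridge KB (by omega)]
    exact hmatch
  have hKe : KA = KB := le_antisymm hAB hBA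
  rw [hfold, PySem.List.slice_from_natCast, hpeel, List.length_drop, hs0len]
  congr 2
  omega

-- ===== VERDICT (by name: the statement is the Claim_ definition above) =====
theorem overlap_merge_spec : Claim_equal_overlap_merge := by
  intro lists _ hpre
  unfold Spec_overlap_merge overlap_merge overlap_merge_alt
  match lists with
  | [] => exact absurd rfl hpre
  | first :: rest =>
    simp only [PySem.List.slice_from_one, List.tail_cons]
    have hget : (PySem.List.pyGet? (first :: rest) 0).getD [] = first := by
      simp [PySem.List.pyGet?, PySem.List.pyIdx?]
    rw [hget]
    exact PySem.List.foldl_congr_mem rest _ _ first (fun acc x _ => step_eq acc x)
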